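-- pv_equiv track=rewrite | github.com/yuepaang/tianchiAI-diabetes | preprocess.py | split_by_ordinal
-- ===== SOURCE A (Python) =====
-- def split_by_ordinal(train, test, attr):
-- 	missing = ['', '??']
-- 	attrs = train[0]
-- 	if attr not in attrs:
-- 		return ([train], [test])
-- 	ind = attrs.index(attr)
-- 	vals = set([row[ind] for row in train[1:] if row[ind] not in missing])
-- 	vals = [val for val in vals]
-- 	vals.sort()
--
-- 	attr_row = train[0][:ind] + train[0][ind + 1:]
-- 	trains, tests = [], []
-- 	for val in vals:
-- 		trains.append([row[:ind] + row[ind + 1:] for row in train if row[ind] == attr or row[ind] == val])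
-- 		tests.append([row[:ind] + row[ind + 1:] for row in test if row[ind] == attr or row[ind] == val])
--
-- 	return (trains, tests)
-- ===== SOURCE B (Python) =====
-- def split_by_ordinal(train, test, attr):
--     if attr not in train[0]:
--         return ([train], [test])
--     ind = train[0].index(attr)
--     missing = ('', '??')
--     vals = sorted({row[ind] for row in train[1:] if row[ind] not in missing})
--     if not vals:
--         return ([], [])
--     pos = {v: i for i, v in enumerate(vals)}
--
--     def split(rows):
--         # one pass: send each row (attr column dropped) to the subset(s) it belongs to
--         out = [[] for _ in vals]
--         for row in rows:
--             v = row[ind]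
--             d = row[:ind] + row[ind + 1:]
--             if v == attr:        # header row: belongs to every subset
--                 for sub in out:
--                     sub.append(d)
--             elif v in pos:
--                 out[pos[v]].append(d)
--         return out
--
--     return (split(train), split(test))
-- ===== Notes on version B (the rewrite author's own statement) =====
-- stated objective: alternative
-- what changed: B replaces A's rescan of the whole train and test lists for every attribute value by a single distributing pass per list (each row, with the attr column dropped, is appended once to the subset of its value, header rows to all subsets); Pre_ excludes only the inputs on which A raises IndexError (empty train, or rows shorter than the attr column where A indexes them).
import Mathlib
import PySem

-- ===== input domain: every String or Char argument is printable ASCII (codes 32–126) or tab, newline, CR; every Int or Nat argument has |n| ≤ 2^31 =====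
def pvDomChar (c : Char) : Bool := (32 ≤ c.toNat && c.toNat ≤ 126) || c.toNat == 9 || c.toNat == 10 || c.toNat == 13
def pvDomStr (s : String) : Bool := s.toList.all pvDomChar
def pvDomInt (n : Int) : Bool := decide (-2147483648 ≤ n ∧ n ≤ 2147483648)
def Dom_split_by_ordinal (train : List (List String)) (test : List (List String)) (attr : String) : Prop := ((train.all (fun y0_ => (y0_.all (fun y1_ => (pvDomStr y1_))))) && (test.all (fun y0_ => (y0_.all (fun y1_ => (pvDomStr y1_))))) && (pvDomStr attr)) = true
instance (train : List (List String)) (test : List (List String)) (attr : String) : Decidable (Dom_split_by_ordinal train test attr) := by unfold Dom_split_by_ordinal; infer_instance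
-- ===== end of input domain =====

-- B distributes each row once into the subset(s) it belongs to (one pass over train and one over test) instead of A's rescan of both lists for every attribute value.

-- ===== PORT A =====
def pvDropCol (ind : Nat) (row : List String) : List String :=
  PySem.List.slice row none (some (ind : Int)) ++ PySem.List.slice row (some ((ind : Int) + 1)) none

def split_by_ordinal (train : List (List String)) (test : List (List String)) (attr : String) : List (List (List String)) × List (List (List String)) :=
  let missing : List String := ["", "??"]
  let attrs := (PySem.List.pyGet? train 0).getD []
  if attr ∈ attrs then
    let ind : Nat := (PySem.List.index? attrs attr).getD 0
    let vals0 := PySem.Set.ofList ((PySem.List.slice train (some 1) none).filterMap (fun row =>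
      match PySem.List.pyGet? row (ind : Int) with
      | none => none
      | some v => if v ∈ missing then none else some v))
    let vals := PySem.List.sorted vals0 (fun x => x) false
    vals.foldl (fun acc val =>
      (acc.1 ++ [(train.filter (fun row =>
          ((PySem.List.pyGet? row (ind : Int)).getD "") == attr ||
          ((PySem.List.pyGet? row (ind : Int)).getD "") == val)).map (pvDropCol ind)],
       acc.2 ++ [(test.filter (fun row =>
          ((PySem.List.pyGet? row (ind : Int)).getD "") == attr ||
          ((PySem.List.pyGet? row (ind : Int)).getD "") == val)).map (pvDropCol ind)]))
      ([], [])
  else ([train], [test])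

-- ===== PORT B =====
-- one loop step of Source B's `split`: route one row into the subsets it belongs to
def pvSplitStep (ind : Nat) (attr : String) (vals : List String)
    (out : List (List (List String))) (row : List String) : List (List (List String)) :=
  let v := (PySem.List.pyGet? row (ind : Int)).getD ""
  let d := pvDropCol ind row
  if v == attr then out.map (fun sub => sub ++ [d])
  else match PySem.List.index? vals v with
       | some i => out.set i ((out.getD i []) ++ [d])
       | none => out

def pvSplit (ind : Nat) (attr : String) (vals : List String)
    (rows : List (List String)) : List (List (List String)) :=
  rows.foldl (pvSplitStep ind attr vals) (vals.map (fun _ => []))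

def split_by_ordinal_alt (train : List (List String)) (test : List (List String)) (attr : String) : List (List (List String)) × List (List (List String)) :=
  let attrs := (PySem.List.pyGet? train 0).getD []
  if attr ∈ attrs then
    let ind : Nat := (PySem.List.index? attrs attr).getD 0
    let missing : List String := ["", "??"]
    let vals := PySem.List.sorted (PySem.Set.ofList ((PySem.List.slice train (some 1) none).filterMap (fun row =>
      match PySem.List.pyGet? row (ind : Int) with
      | none => none
      | some v => if v ∈ missing then none else some v))) (fun x => x) false
    if vals = [] then ([], [])
    else (pvSplit ind attr vals train, pvSplit ind attr vals test)
  else ([train], [test])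

-- ===== PRECONDITION & SPEC =====
-- Pre_ excludes exactly the inputs on which Python A raises IndexError: empty train (train[0]), or,
-- when attr is a header entry, a train body row not reaching the attr column, or — when the body
-- yields at least one non-missing attribute value, so the per-value filters actually run — a test
-- row not reaching that column.
def Pre_split_by_ordinal (train : List (List String)) (test : List (List String)) (attr : String) : Prop :=
  train ≠ [] ∧ (attr ∈ train.headD [] →
    ((∀ row ∈ train.drop 1, (PySem.List.index? (train.headD []) attr).getD 0 < row.length) ∧
     ((∃ row ∈ train.drop 1,
         row.getD ((PySem.List.index? (train.headD []) attr).getD 0) "" ∉ (["", "??"] : List String)) →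
       ∀ row ∈ test, (PySem.List.index? (train.headD []) attr).getD 0 < row.length)))
instance (train : List (List String)) (test : List (List String)) (attr : String) : Decidable (Pre_split_by_ordinal train test attr) := by unfold Pre_split_by_ordinal; infer_instance

def pvWitness_split_by_ordinal : List (List String) × List (List String) × String :=
  ([["a", "b"], ["1", "x"]], [["2", "y"]], "a")

def Spec_split_by_ordinal (train : List (List String)) (test : List (List String)) (attr : String) (out : List (List (List String)) × List (List (List String))) : Prop := out = split_by_ordinal_alt train test attr
instance (train : List (List String)) (test : List (List String)) (attr : String) (out : List (List (List String)) × List (List (List String))) : Decidable (Spec_split_by_ordinal train test attr out) := by unfold Spec_split_by_ordinal; infer_instance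

-- ===== CLAIM (what is proved, stated in full; the proofs are below) =====
def Claim_equal_split_by_ordinal : Prop := ∀ (train : List (List String)) (test : List (List String)) (attr : String), Dom_split_by_ordinal train test attr → Pre_split_by_ordinal train test attr → Spec_split_by_ordinal train test attr (split_by_ordinal train test attr)

-- ===== LEMMAS AND PROOFS =====

lemma pvStep_eq (ind : Nat) (attr : String) (vals : List String) (hnd : vals.Nodup)
    (g : String → List (List String)) (row : List String) :
    pvSplitStep ind attr vals (vals.map g) row
    = vals.map (fun val =>
        if ((PySem.List.pyGet? row (ind : Int)).getD "") == attr ||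
           ((PySem.List.pyGet? row (ind : Int)).getD "") == val
        then g val ++ [pvDropCol ind row] else g val) := by
  simp only [pvSplitStep]
  generalize ((PySem.List.pyGet? row (ind : Int)).getD "") = v
  by_cases ha : v = attr
  · rw [if_pos (by simp [ha])]
    simp [ha, Function.comp]
  · rw [if_neg (by simp [ha])]
    rcases hidx : PySem.List.index? vals v with _ | i
    · show List.map g vals = _
      have hnm : v ∉ vals := (PySem.List.index?_eq_none_iff vals v).mp hidx
      refine Eq.symm (List.map_congr_left ?_)
      intro val hval
      have hvv : v ≠ val := fun h => hnm (h ▸ hval)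
      simp [ha, hvv]
    · show (List.map g vals).set i ((List.map g vals).getD i [] ++ [pvDropCol ind row]) = _
      obtain ⟨hk, hvi, _⟩ := PySem.List.getElem_of_index?_eq_some hidx
      apply List.ext_getElem
      · simp
      · intro j hj hj'
        rw [List.length_set, List.length_map] at hj
        by_cases hji : j = i
        · subst hji
          rw [List.getElem_set_self (by simpa using hj)]
          have h2 : (vals.map g).getD j [] = g vals[j] := by
            simp [List.getD, List.getElem?_map, List.getElem?_eq_getElem hk]
          rw [h2, List.getElem_map]
          simp [hvi]
        · rw [List.getElem_set_ne (by omega), List.getElem_map, List.getElem_map]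
          have hne : v ≠ vals[j] := by
            intro h
            have h3 : vals[i] = vals[j] := hvi.trans h
            exact hji (((List.Nodup.getElem_inj_iff hnd).mp h3).symm)
          simp [ha, hne]

lemma pvSplit_inv (ind : Nat) (attr : String) (vals : List String) (hnd : vals.Nodup) :
    ∀ (rows : List (List String)) (g : String → List (List String)),
    rows.foldl (pvSplitStep ind attr vals) (vals.map g)
    = vals.map (fun val => g val ++ (rows.filter (fun row =>
        ((PySem.List.pyGet? row (ind : Int)).getD "") == attr ||
        ((PySem.List.pyGet? row (ind : Int)).getD "") == val)).map (pvDropCol ind)) := by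
  intro rows
  induction rows with
  | nil => intro g; simp
  | cons r rows ih =>
    intro g
    rw [List.foldl_cons, pvStep_eq ind attr vals hnd g r, ih]
    refine List.map_congr_left ?_
    intro val _
    simp only [List.filter_cons]
    split_ifs <;> simp

lemma pvSplit_eq (ind : Nat) (attr : String) (vals : List String) (hnd : vals.Nodup)
    (rows : List (List String)) :
    pvSplit ind attr vals rows = vals.map (fun val => (rows.filter (fun row =>
        ((PySem.List.pyGet? row (ind : Int)).getD "") == attr ||
        ((PySem.List.pyGet? row (ind : Int)).getD "") == val)).map (pvDropCol ind)) := by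
  unfold pvSplit
  rw [pvSplit_inv ind attr vals hnd rows (fun _ => [])]
  simp

theorem split_by_ordinal_spec : Claim_equal_split_by_ordinal := by
  intro train test attr _ _
  unfold Spec_split_by_ordinal
  unfold split_by_ordinal split_by_ordinal_alt
  set attrs := (PySem.List.pyGet? train 0).getD [] with hattrs
  by_cases hmem : attr ∈ attrs
  · simp only [hmem, if_true]
    set ind : Nat := (PySem.List.index? attrs attr).getD 0 with hind
    set vals := PySem.List.sorted (PySem.Set.ofList ((PySem.List.slice train (some 1) none).filterMap (fun row =>
      match PySem.List.pyGet? row (ind : Int) with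
      | none => none
      | some v => if v ∈ (["", "??"] : List String) then none else some v))) (fun x => x) false with hvals
    have hnd : vals.Nodup :=
      (PySem.List.sorted_perm _ _ _).nodup_iff.mpr (PySem.Set.nodup_ofList _)
    rw [PySem.List.foldl_prod_mk
      (f := fun acc val =>
        acc ++ [(train.filter (fun row =>
          ((PySem.List.pyGet? row (ind : Int)).getD "") == attr ||
          ((PySem.List.pyGet? row (ind : Int)).getD "") == val)).map (pvDropCol ind)])
      (g := fun acc val =>
        acc ++ [(test.filter (fun row =>
          ((PySem.List.pyGet? row (ind : Int)).getD "") == attr ||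
          ((PySem.List.pyGet? row (ind : Int)).getD "") == val)).map (pvDropCol ind)])]
    rw [PySem.List.foldl_append_singleton_eq_map, PySem.List.foldl_append_singleton_eq_map]
    by_cases hv0 : vals = []
    · simp [hv0]
    · simp only [hv0, if_false, List.nil_append]
      rw [pvSplit_eq ind attr vals hnd train, pvSplit_eq ind attr vals hnd test]
  · simp [hmem]
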